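-- pv_equiv track=rewrite | github.com/Zulaianny/desafio-cronowise-zulaiannny | Bloco 1/bloco1.py | verificar_alertas
-- ===== SOURCE A (Python) =====
-- def verificar_alertas(tempos):
--     alertas = []
--     contador = 0
--
--     for i in range(len(tempos)):
--         if tempos[i] > 2000:
--             contador += 1
--             if contador == 3:
--                 alertas.append(i)
--         else:
--             contador = 0
--
--     return alertas
-- ===== SOURCE B (Python) =====
-- def verificar_alertas(tempos):
--     return [
--         i for i in range(len(tempos))
--         if i >= 2
--         and tempos[i] > 2000 and tempos[i - 1] > 2000 and tempos[i - 2] > 2000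
--         and (i == 2 or tempos[i - 3] <= 2000)
--     ]
-- ===== Notes on version B (the rewrite author's own statement) =====
-- stated objective: alternative
-- what changed: Replaces A's stateful running-counter loop by a stateless list comprehension that tests each index against a fixed 3-element window with a run-start guard (i==2 or tempos[i-3]<=2000).
import Mathlib
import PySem

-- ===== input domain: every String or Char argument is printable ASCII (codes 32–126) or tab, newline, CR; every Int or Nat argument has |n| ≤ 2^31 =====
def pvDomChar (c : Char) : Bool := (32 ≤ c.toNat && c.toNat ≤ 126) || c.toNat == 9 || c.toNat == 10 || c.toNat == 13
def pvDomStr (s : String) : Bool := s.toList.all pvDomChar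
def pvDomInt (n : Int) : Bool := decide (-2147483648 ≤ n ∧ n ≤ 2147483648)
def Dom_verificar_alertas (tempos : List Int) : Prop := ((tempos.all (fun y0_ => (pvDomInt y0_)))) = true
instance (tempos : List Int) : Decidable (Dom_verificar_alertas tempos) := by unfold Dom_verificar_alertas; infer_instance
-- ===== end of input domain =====

-- B replaces A's running streak counter by a stateless per-index test on a fixed 3-element
-- window with a run-start guard (alternative decomposition, same O(n) cost).

-- ===== PORT A =====
-- one loop step of A: mutate (alertas, contador) at index i
def vaStepA (tempos : List Int) (st : List Int × Int) (i : Int) : List Int × Int :=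
  if 2000 < PySem.List.pyGetD tempos i 0 then
    let c := st.2 + 1
    (if c = 3 then st.1 ++ [i] else st.1, c)
  else (st.1, 0)

def verificar_alertas (tempos : List Int) : List Int :=
  ((PySem.List.pyRange 0 (PySem.List.len tempos) 1).foldl (vaStepA tempos) ([], 0)).1

-- ===== PORT B =====
-- the comprehension's filter condition at index i
def vaCondB (tempos : List Int) (i : Int) : Bool :=
  decide (2 ≤ i) &&
  decide (2000 < PySem.List.pyGetD tempos i 0) &&
  decide (2000 < PySem.List.pyGetD tempos (i - 1) 0) &&
  decide (2000 < PySem.List.pyGetD tempos (i - 2) 0) &&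
  (i == 2 || decide (PySem.List.pyGetD tempos (i - 3) 0 ≤ 2000))

def verificar_alertas_alt (tempos : List Int) : List Int :=
  (PySem.List.pyRange 0 (PySem.List.len tempos) 1).filter (vaCondB tempos)

-- ===== PRECONDITION & SPEC =====
def Spec_verificar_alertas (tempos : List Int) (out : List Int) : Prop := out = verificar_alertas_alt tempos
instance (tempos : List Int) (out : List Int) : Decidable (Spec_verificar_alertas tempos out) := by unfold Spec_verificar_alertas; infer_instance

-- ===== CLAIM (what is proved, stated in full; the proofs are below) =====
def Claim_equal_verificar_alertas : Prop := ∀ (tempos : List Int), Dom_verificar_alertas tempos → Spec_verificar_alertas tempos (verificar_alertas tempos)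

-- ===== LEMMAS AND PROOFS =====

-- length of the maximal all->2000 suffix of the first n elements (A's contador after n steps)
def vaStreak (tempos : List Int) : Nat → Nat
  | 0 => 0
  | n + 1 => if 2000 < tempos[n]?.getD 0 then vaStreak tempos n + 1 else 0

-- B's test at Nat index n is exactly "A's counter reaches 3 at step n"
lemma vaCondB_iff (tempos : List Int) (n : Nat) :
    vaCondB tempos (n : Int) = true ↔ vaStreak tempos (n + 1) = 3 := by
  rcases n with _ | _ | _ | m
  · simp only [vaCondB, vaStreak, Nat.cast_zero]
    constructor
    · intro h; simp at h
    · intro h; split_ifs at h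
      omega
  · simp only [vaCondB, vaStreak]
    constructor
    · intro h; simp at h
    · intro h; split_ifs at h <;> omega
  · have h2 : ((2 : Nat) : Int) == 2 := by decide
    simp only [vaCondB, vaStreak, h2, Bool.and_eq_true,
      decide_eq_true_eq]
    rw [show ((2 : Nat) : Int) - 1 = ((1 : Nat) : Int) by omega,
        show ((2 : Nat) : Int) - 2 = ((0 : Nat) : Int) by omega]
    simp only [PySem.List.pyGetD_natCast, List.getD, show 0 + 1 + 1 = 2 from rfl,
      show 0 + 1 = 1 from rfl]
    split_ifs <;> constructor <;> intro h <;> simp_all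
  · have e1 : ((m + 3 : Nat) : Int) - 1 = ((m + 2 : Nat) : Int) := by push_cast; ring
    have e2 : ((m + 3 : Nat) : Int) - 2 = ((m + 1 : Nat) : Int) := by push_cast; ring
    have e3 : ((m + 3 : Nat) : Int) - 3 = ((m : Nat) : Int) := by push_cast; ring
    have ene : (((m + 3 : Nat) : Int) == 2) = false := by
      simp only [beq_eq_false_iff_ne, ne_eq]; omega
    simp only [vaCondB, vaStreak, e1, e2, e3, PySem.List.pyGetD_natCast, List.getD,
      Bool.and_eq_true, Bool.or_eq_true, decide_eq_true_eq, ene,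
      show m + 1 + 1 + 1 = m + 3 from by omega, show m + 1 + 1 = m + 2 from by omega]
    split_ifs <;> constructor <;> intro h <;> simp_all <;> omega

-- the loop invariant: after processing indices 0..n-1, A's state is (B's filter so far, streak n)
lemma vaLoop_inv (tempos : List Int) (n : Nat) :
    (PySem.List.pyRange 0 (n : Int) 1).foldl (vaStepA tempos) ([], 0) =
      ((PySem.List.pyRange 0 (n : Int) 1).filter (vaCondB tempos),
        (vaStreak tempos n : Int)) := by
  induction n with
  | zero => simp [PySem.List.pyRange_one_eq_nil, vaStreak]
  | succ m ih =>
    have hsplit : PySem.List.pyRange 0 ((m + 1 : Nat) : Int) 1 =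
        PySem.List.pyRange 0 (m : Int) 1 ++ [(m : Int)] := by
      have h : ((m + 1 : Nat) : Int) = (m : Int) + 1 := by push_cast; ring
      rw [h, PySem.List.pyRange_one_succ_right (by omega)]
    rw [hsplit, List.foldl_append, List.filter_append, ih]
    simp only [List.foldl, List.filter]
    have hiff := vaCondB_iff tempos m
    by_cases hc : vaCondB tempos (m : Int) = true
    · have h3 : vaStreak tempos (m + 1) = 3 := hiff.1 hc
      have hg : 2000 < tempos[m]?.getD 0 := by
        by_contra h; simp only [vaStreak, if_neg h] at h3; omega
      have h2 : vaStreak tempos m = 2 := by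
        simp only [vaStreak, if_pos hg] at h3; omega
      simp [vaStepA, hc, hg, PySem.List.pyGetD_natCast, List.getD, h2, vaStreak]
    · have h3 : vaStreak tempos (m + 1) ≠ 3 := fun h => hc (hiff.2 h)
      by_cases hg : 2000 < tempos[m]?.getD 0
      · have hs : vaStreak tempos (m + 1) = vaStreak tempos m + 1 := by
          simp only [vaStreak, if_pos hg]
        have hne : ¬ ((vaStreak tempos m : Int) + 1 = 3) := by
          intro h; apply h3; omega
        simp [vaStepA, hc, hg, PySem.List.pyGetD_natCast, List.getD, hne, hs]
        try push_cast
        try ring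
      · have hs : vaStreak tempos (m + 1) = 0 := by
          simp only [vaStreak, if_neg hg]
        simp [vaStepA, hc, hg, PySem.List.pyGetD_natCast, List.getD, hs]

-- ===== VERDICT (by name: the statement is the Claim_ definition above) =====
theorem verificar_alertas_spec : Claim_equal_verificar_alertas := by
  intro tempos _
  unfold Spec_verificar_alertas verificar_alertas verificar_alertas_alt
  rw [show PySem.List.len tempos = (tempos.length : Int) from PySem.List.len_eq tempos]
  rw [vaLoop_inv]
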